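-- pv_equiv track=rewrite | github.com/KuyaJimbo/CodeWiz_Mini_Projects | Python Project/Text-Based Python/gambling.py | bestCard
-- ===== SOURCE A (Python) =====
-- def bestCard(cards):
--   suitranking = {"clubs":0,"diamonds":1,"hearts":2,"spades":3}
--   best = cards[0]
--   for card in cards:
--     if best[1] < card[1]:
--       best = card
--     elif best[1] == card[1]:
--       if suitranking[best[0]]<suitranking[card[0]]:
--         best = card
--   return best
-- ===== SOURCE B (Python) =====
-- def bestCard(cards):
--   suitranking = {"clubs":0,"diamonds":1,"hearts":2,"spades":3}
--   ordered = sorted(cards, key=lambda c: (c[1], suitranking[c[0]]))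
--   return ordered[-1]
-- ===== Notes on version B (the rewrite author's own statement) =====
-- stated objective: idiomatic
-- what changed: Replaces the hand-written running-comparison scan over rank then suit with a stable sort by the tuple key (rank, suit rank) followed by taking the last element.
-- outside the precondition, e.g. on bestCard([('clubs', 1), ('joker', 2)]): A returns ('joker', 2), B raises KeyError
import Mathlib
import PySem

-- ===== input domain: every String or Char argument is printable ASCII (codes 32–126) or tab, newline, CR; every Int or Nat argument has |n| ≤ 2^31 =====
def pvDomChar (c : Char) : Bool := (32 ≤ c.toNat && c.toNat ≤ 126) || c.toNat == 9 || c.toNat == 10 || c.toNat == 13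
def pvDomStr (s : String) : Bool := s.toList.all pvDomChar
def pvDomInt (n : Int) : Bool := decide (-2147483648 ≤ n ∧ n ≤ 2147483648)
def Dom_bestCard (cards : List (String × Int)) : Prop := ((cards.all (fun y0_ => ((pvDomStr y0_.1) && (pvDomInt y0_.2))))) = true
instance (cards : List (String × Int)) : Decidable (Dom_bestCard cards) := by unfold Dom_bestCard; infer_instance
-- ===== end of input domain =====

-- B replaces A's running-comparison scan by a stable sort on the key (rank, suit rank) and takes the last element (idiomatic; same result).

-- ===== PORT A =====
-- the dict literal {"clubs":0,"diamonds":1,"hearts":2,"spades":3}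
def pvSuitDict : PySem.Dict String Int :=
  PySem.Dict.ofList [("clubs", 0), ("diamonds", 1), ("hearts", 2), ("spades", 3)]

-- suitranking[s]; the lookup raises KeyError for other suits, which Pre_ excludes, so the default 0 is never used under Pre_
def pvSuitRank (s : String) : Int := pvSuitDict.getD s 0

def bestCard (cards : List (String × Int)) : String × Int :=
  -- best = cards[0]: IndexError on the empty list, excluded by Pre_; the default is never used under Pre_
  cards.foldl (fun best card =>
    if best.2 < card.2 then card
    else if best.2 == card.2 then
      if pvSuitRank best.1 < pvSuitRank card.1 then card else best
    else best) ((PySem.List.pyGet? cards 0).getD ("", 0))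

-- ===== PORT B =====
def bestCard_alt (cards : List (String × Int)) : String × Int :=
  -- ordered[-1]: IndexError on the empty list, excluded by Pre_; the default is never used under Pre_
  (PySem.List.pyGet?
    (PySem.List.sorted2 cards (fun c => c.2) (fun c => pvSuitRank c.1)) (-1)).getD ("", 0)

-- ===== PRECONDITION & SPEC =====
-- Pre_ excludes the empty list (A's cards[0] raises IndexError) and lists containing a suit outside
-- the four keys of suitranking: on those A raises KeyError whenever a rank tie forces the suit lookup
-- (in particular always on the first card), and B raises KeyError always; Pre_ also excludes some
-- inputs with an unknown suit on which A happens to return because no rank tie reaches the lookup.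
def Pre_bestCard (cards : List (String × Int)) : Prop :=
  cards ≠ [] ∧ (cards.all (fun c => c.1 ∈ ["clubs", "diamonds", "hearts", "spades"])) = true
instance (cards : List (String × Int)) : Decidable (Pre_bestCard cards) := by unfold Pre_bestCard; infer_instance
def pvWitness_bestCard : (List (String × Int)) := [("clubs", 3), ("spades", 3), ("hearts", 2)]

def Spec_bestCard (cards : List (String × Int)) (out : String × Int) : Prop := out = bestCard_alt cards
instance (cards : List (String × Int)) (out : String × Int) : Decidable (Spec_bestCard cards out) := by unfold Spec_bestCard; infer_instance

-- ===== CLAIM (what is proved, stated in full; the proofs are below) =====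
def Claim_equal_bestCard : Prop := ∀ (cards : List (String × Int)), Dom_bestCard cards → Pre_bestCard cards → Spec_bestCard cards (bestCard cards)

-- ===== LEMMAS AND PROOFS =====

-- the (non-strict) lexicographic order on the key (rank, suit rank)
def pvKle (a b : String × Int) : Prop :=
  a.2 < b.2 ∨ (a.2 = b.2 ∧ pvSuitRank a.1 ≤ pvSuitRank b.1)

theorem pvKle_refl (a : String × Int) : pvKle a a := Or.inr ⟨rfl, le_refl _⟩

theorem pvKle_trans {a b c : String × Int} (h1 : pvKle a b) (h2 : pvKle b c) : pvKle a c := by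
  unfold pvKle at *
  rcases h1 with h1 | ⟨h1, h1'⟩ <;> rcases h2 with h2 | ⟨h2, h2'⟩
  · exact Or.inl (lt_trans h1 h2)
  · exact Or.inl (h2 ▸ h1)
  · exact Or.inl (h1 ▸ h2)
  · exact Or.inr ⟨h1.trans h2, le_trans h1' h2'⟩

-- A's loop step
def pvStep (best card : String × Int) : String × Int :=
  if best.2 < card.2 then card
  else if best.2 == card.2 then
    if pvSuitRank best.1 < pvSuitRank card.1 then card else best
  else best

theorem pvStep_cases (best card : String × Int) :
    (pvStep best card = best ∨ pvStep best card = card) ∧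
    pvKle best (pvStep best card) ∧ pvKle card (pvStep best card) := by
  unfold pvStep pvKle
  split_ifs with h1 h2 h3 <;>
    simp_all <;> omega

-- A's fold: the result is the initial best or a list element, and dominates both
theorem pvFoldA_spec (l : List (String × Int)) (best : String × Int) :
    (l.foldl pvStep best = best ∨ l.foldl pvStep best ∈ l) ∧
    pvKle best (l.foldl pvStep best) ∧
    ∀ c ∈ l, pvKle c (l.foldl pvStep best) := by
  induction l generalizing best with
  | nil => exact ⟨Or.inl rfl, pvKle_refl best, by simp⟩
  | cons x xs ih =>
    obtain ⟨hmem, hbest, hall⟩ := ih (pvStep best x)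
    obtain ⟨hc, hb, hx⟩ := pvStep_cases best x
    simp only [List.foldl_cons]
    refine ⟨?_, pvKle_trans hb hbest, ?_⟩
    · rcases hmem with h | h
      · rcases hc with hc | hc
        · exact Or.inl (h.trans hc)
        · refine Or.inr ?_
          rw [h, hc]
          simp
      · exact Or.inr (List.mem_cons_of_mem x h)
    · intro c hcmem
      rcases List.mem_cons.mp hcmem with rfl | hcmem
      · exact pvKle_trans hx hbest
      · exact hall c hcmem

-- B's comparator (the 'before' of the lexicographic insertion sort)
def pvBefore (a b : String × Int) : Bool :=
  decide (a.2 < b.2) || !decide (b.2 < a.2) && decide (pvSuitRank a.1 < pvSuitRank b.1)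

theorem pvBefore_kle {a b : String × Int} (h : pvBefore a b = true) : pvKle a b := by
  unfold pvBefore at h; unfold pvKle
  simp only [Bool.or_eq_true, Bool.and_eq_true, Bool.not_eq_true', decide_eq_true_eq,
    decide_eq_false_iff_not] at h
  omega

theorem pvNotBefore_kle {a b : String × Int} (h : ¬ pvBefore a b = true) : pvKle b a := by
  unfold pvBefore at h; unfold pvKle
  simp only [Bool.or_eq_true, Bool.and_eq_true, Bool.not_eq_true', decide_eq_true_eq,
    decide_eq_false_iff_not, not_or, not_and] at h
  omega

theorem pvInsertBy_pairwise (x : String × Int) (l : List (String × Int))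
    (h : l.Pairwise pvKle) : (PySem.List.insertBy pvBefore x l).Pairwise pvKle := by
  induction l with
  | nil => simp [PySem.List.insertBy]
  | cons y ys ih =>
    rw [List.pairwise_cons] at h
    obtain ⟨hy, hys⟩ := h
    show (if pvBefore x y = true then x :: y :: ys else y :: PySem.List.insertBy pvBefore x ys).Pairwise pvKle
    split_ifs with hb
    · refine List.pairwise_cons.mpr ⟨?_, List.pairwise_cons.mpr ⟨hy, hys⟩⟩
      intro z hz
      rcases List.mem_cons.mp hz with rfl | hz
      · exact pvBefore_kle hb
      · exact pvKle_trans (pvBefore_kle hb) (hy z hz)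
    · refine List.pairwise_cons.mpr ⟨?_, ih hys⟩
      intro z hz
      rcases (PySem.List.mem_insertBy pvBefore x z ys).mp hz with rfl | hz
      · exact pvNotBefore_kle hb
      · exact hy z hz

theorem pvSorted2_pairwise (cards : List (String × Int)) :
    (PySem.List.sorted2 cards (fun c => c.2) (fun c => pvSuitRank c.1)).Pairwise pvKle := by
  show (cards.foldl (fun acc x => PySem.List.insertBy pvBefore x acc) []).Pairwise pvKle
  have : ∀ (l : List (String × Int)) (acc : List (String × Int)), acc.Pairwise pvKle →
      (l.foldl (fun acc x => PySem.List.insertBy pvBefore x acc) acc).Pairwise pvKle := by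
    intro l
    induction l with
    | nil => intro acc h; exact h
    | cons x xs ih => intro acc h; exact ih _ (pvInsertBy_pairwise x acc h)
  exact this cards [] (List.Pairwise.nil)

-- the last element of a pvKle-pairwise list dominates every element
theorem pvLast_max (l : List (String × Int)) (h : l.Pairwise pvKle) (m : String × Int)
    (hm : l.getLast? = some m) : ∀ c ∈ l, pvKle c m := by
  induction l with
  | nil => simp at hm
  | cons x xs ih =>
    rw [List.pairwise_cons] at h
    obtain ⟨hx, hxs⟩ := h
    intro c hc
    cases xs with
    | nil =>
      simp at hm hc
      subst hm; subst hc; exact pvKle_refl _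
    | cons y ys =>
      rw [List.getLast?_cons_cons] at hm
      have hmem : m ∈ y :: ys := List.mem_of_getLast? hm
      rcases List.mem_cons.mp hc with rfl | hc
      · exact pvKle_trans (hx m hmem) (pvKle_refl m)
      · exact ih hxs hm c hc

-- equal key + both suits among the four → equal card
theorem pvSuitRank_inj {s t : String}
    (hs : s ∈ (["clubs", "diamonds", "hearts", "spades"] : List String))
    (ht : t ∈ (["clubs", "diamonds", "hearts", "spades"] : List String))
    (h : pvSuitRank s = pvSuitRank t) : s = t := by
  fin_cases hs <;> fin_cases ht <;> revert h <;> decide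

theorem pvKle_antisymm {a b : String × Int}
    (ha : a.1 ∈ (["clubs", "diamonds", "hearts", "spades"] : List String))
    (hb : b.1 ∈ (["clubs", "diamonds", "hearts", "spades"] : List String))
    (h1 : pvKle a b) (h2 : pvKle b a) : a = b := by
  unfold pvKle at h1 h2
  have h2' : a.2 = b.2 := by omega
  have h3 : pvSuitRank a.1 = pvSuitRank b.1 := by omega
  exact Prod.ext (pvSuitRank_inj ha hb h3) h2'

-- pyGet? at -1 of a nonempty list is its last element
theorem pvPyGet_neg_one (l : List (String × Int)) (h : l ≠ []) :
    PySem.List.pyGet? l (-1) = l.getLast? := by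
  unfold PySem.List.pyGet? PySem.List.pyIdx?
  have hl : 1 ≤ l.length := List.length_pos_iff.mpr h
  rw [List.getLast?_eq_getElem?]
  simp only [show ¬ (0:Int) ≤ -1 by omega, if_false]
  rw [if_pos (by omega)]
  simp

-- ===== VERDICT (by name: the statement is the Claim_ definition above) =====
theorem bestCard_spec : Claim_equal_bestCard := by
  intro cards _ hpre
  obtain ⟨hne, hvalid⟩ := hpre
  obtain ⟨x, xs, rfl⟩ : ∃ x xs, cards = x :: xs := by
    cases cards with
    | nil => exact absurd rfl hne
    | cons x xs => exact ⟨x, xs, rfl⟩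
  unfold Spec_bestCard bestCard bestCard_alt
  simp only [List.all_eq_true, decide_eq_true_eq] at hvalid
  -- A's result: cards[0] is the head
  have hc0 : PySem.List.pyGet? (x :: xs) 0 = some x := by
    simp [PySem.List.pyGet?, PySem.List.pyIdx?]
  obtain ⟨hAmem, _, hAall⟩ := pvFoldA_spec (x :: xs) x
  set rA := (x :: xs).foldl pvStep x with hrA
  have hrAmem : rA ∈ x :: xs := by
    rcases hAmem with h | h
    · rw [h]; exact List.mem_cons_self
    · exact h
  -- B's result: the last element of the sorted list
  set ordered := PySem.List.sorted2 (x :: xs) (fun c => c.2) (fun c => pvSuitRank c.1) with hord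
  have hperm : ordered.Perm (x :: xs) := PySem.List.sorted2_perm (x :: xs) _ _ false
  have hordne : ordered ≠ [] := by
    intro h; rw [h] at hperm
    exact absurd hperm.nil_eq.symm (by simp)
  obtain ⟨m, hm⟩ : ∃ m, ordered.getLast? = some m := by
    cases hh : ordered.getLast? with
    | none => exact absurd (List.getLast?_eq_none_iff.mp hh) hordne
    | some m => exact ⟨m, rfl⟩
  have hmmem : m ∈ x :: xs := hperm.mem_iff.mp (List.mem_of_getLast? hm)
  have hmall : ∀ c ∈ x :: xs, pvKle c m := by
    intro c hc
    exact pvLast_max ordered (pvSorted2_pairwise (x :: xs)) m hm c (hperm.mem_iff.mpr hc)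
  -- both are maxima; conclude by antisymmetry
  have heq : rA = m :=
    pvKle_antisymm (hvalid rA hrAmem) (hvalid m hmmem) (hmall rA hrAmem) (hAall m hmmem)
  rw [hc0, pvPyGet_neg_one ordered hordne, hm]
  exact heq
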